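-- pv_equiv track=rewrite | github.com/JuanCS-Dev/twitch-v-bot | bot/main.py | _parse_channel_management_prompt
-- ===== SOURCE A (Python) =====
-- def _parse_channel_management_prompt(prompt: str) -> tuple[str, str] | None:
--     normalized_prompt = " ".join((prompt or "").strip().split())
--     if not normalized_prompt:
--         return None
--
--     lowered_prompt = normalized_prompt.lower()
--     if lowered_prompt in {
--         "canais",
--         "canal",
--         "channels",
--         "channel",
--         "list channels",
--         "listar canais",
--     }:
--         return ("list", "")
--
--     for prefix in ("join ", "entrar ", "add "):
--         if lowered_prompt.startswith(prefix):
--             return ("join", normalized_prompt[len(prefix) :].strip())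
--
--     for prefix in ("part ", "leave ", "sair ", "remove "):
--         if lowered_prompt.startswith(prefix):
--             return ("part", normalized_prompt[len(prefix) :].strip())
--
--     return None
-- ===== SOURCE B (Python) =====
-- _LIST_PHRASES = {"canais", "canal", "channels", "channel", "list channels", "listar canais"}
-- _JOIN_VERBS = ("join", "entrar", "add")
-- _PART_VERBS = ("part", "leave", "sair", "remove")
--
--
-- def _parse_channel_management_prompt(prompt: str) -> tuple[str, str] | None:
--     words = (prompt or "").split()
--     if not words:
--         return None
--     lowered = [w.lower() for w in words]
--     if " ".join(lowered) in _LIST_PHRASES: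
--         return ("list", "")
--     if len(words) < 2:
--         return None
--     verb = lowered[0]
--     if verb in _JOIN_VERBS:
--         return ("join", " ".join(words[1:]))
--     if verb in _PART_VERBS:
--         return ("part", " ".join(words[1:]))
--     return None
-- ===== Notes on version B (the rewrite author's own statement) =====
-- stated objective: simpler
-- what changed: A rebuilds a normalized string and scans seven verb+space prefixes against it; B splits the prompt into tokens once, matches the lowered token join against the list-phrase set, and dispatches on the first lowered word via verb sets with a len(words)>=2 guard, rebuilding the argument from the remaining tokens.
import Mathlib
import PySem

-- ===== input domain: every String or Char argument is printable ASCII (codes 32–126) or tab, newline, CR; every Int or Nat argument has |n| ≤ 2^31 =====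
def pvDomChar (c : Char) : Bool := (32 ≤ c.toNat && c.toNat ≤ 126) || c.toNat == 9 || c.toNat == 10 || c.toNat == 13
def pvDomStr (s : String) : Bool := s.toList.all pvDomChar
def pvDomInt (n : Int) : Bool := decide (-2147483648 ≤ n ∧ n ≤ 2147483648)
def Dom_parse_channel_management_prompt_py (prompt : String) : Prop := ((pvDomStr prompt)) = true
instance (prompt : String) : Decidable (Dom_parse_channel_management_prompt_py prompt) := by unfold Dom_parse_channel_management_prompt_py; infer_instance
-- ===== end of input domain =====

-- B replaces A's prefix-scan parser by tokenize-once-then-dispatch on the first word (objective: simpler decomposition; same cost).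

-- ===== PORT A =====
-- helper for A's two 'for prefix in (…): if lowered.startswith(prefix): return (action, normalized[len(prefix):].strip())' loops
def pvScanPrefixes (action normalized lowered : String) : List String → Option (String × String)
  | [] => none
  | p :: rest =>
    if PySem.Str.startswith lowered p then
      some (action, PySem.Str.strip (PySem.Str.slice normalized (some (PySem.Str.len p)) none))
    else pvScanPrefixes action normalized lowered rest

def parse_channel_management_prompt_py (prompt : String) : Option (String × String) :=
  let normalized := PySem.Str.join " " (PySem.Str.split₀ (PySem.Str.strip prompt))
  if normalized = "" then none
  else
    let lowered := PySem.Str.lower normalized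
    if lowered ∈ ["canais", "canal", "channels", "channel", "list channels", "listar canais"] then
      some ("list", "")
    else
      match pvScanPrefixes "join" normalized lowered ["join ", "entrar ", "add "] with
      | some r => some r
      | none =>
        match pvScanPrefixes "part" normalized lowered ["part ", "leave ", "sair ", "remove "] with
        | some r => some r
        | none => none

-- ===== PORT B =====
def parse_channel_management_prompt_py_alt (prompt : String) : Option (String × String) :=
  match PySem.Str.split₀ prompt with             -- words = (prompt or "").split(); if not words: return None
  | [] => none
  | w :: rest =>
    let lowered := (w :: rest).map PySem.Str.lower
    if PySem.Str.join " " lowered ∈ ["canais", "canal", "channels", "channel", "list channels", "listar canais"] then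
      some ("list", "")
    else if (w :: rest).length < 2 then none
    else
      let verb := lowered.headD ""               -- lowered[0]
      if verb ∈ ["join", "entrar", "add"] then
        some ("join", PySem.Str.join " " rest)
      else if verb ∈ ["part", "leave", "sair", "remove"] then
        some ("part", PySem.Str.join " " rest)
      else none

-- ===== PRECONDITION & SPEC =====
def Spec_parse_channel_management_prompt_py (prompt : String) (out : Option (String × String)) : Prop := out = parse_channel_management_prompt_py_alt prompt
instance (prompt : String) (out : Option (String × String)) : Decidable (Spec_parse_channel_management_prompt_py prompt out) := by unfold Spec_parse_channel_management_prompt_py; infer_instance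

-- ===== CLAIM (what is proved, stated in full; the proofs are below) =====
def Claim_equal_parse_channel_management_prompt_py : Prop := ∀ (prompt : String), Dom_parse_channel_management_prompt_py prompt → Spec_parse_channel_management_prompt_py prompt (parse_channel_management_prompt_py prompt)

-- ===== LEMMAS AND PROOFS =====

-- reference recursion for str.split() used only in proofs
def pvRefWords (s : List Char) : List (List Char) :=
  match s with
  | [] => []
  | c :: rest =>
    if PySem.Chars.isspace c then pvRefWords rest
    else (c :: rest.takeWhile (fun d => !PySem.Chars.isspace d)) ::
         pvRefWords (rest.dropWhile (fun d => !PySem.Chars.isspace d))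
termination_by s.length
decreasing_by
  all_goals
    have := List.length_dropWhile_le (fun d => !PySem.Chars.isspace d) rest
    simp only [List.length_cons]
    omega

def pvNoSpace (w : List Char) : Bool := w.all (fun c => !PySem.Chars.isspace c)

def pvWords (ws : List (List Char)) : Prop := ∀ w ∈ ws, w ≠ [] ∧ pvNoSpace w = true

theorem pvGoSpec (s : List Char) (cur : List Char) (acc : List (List Char)) :
    PySem.Chars.split₀.go s cur acc =
      acc.reverse ++
        (if cur.isEmpty then pvRefWords s
         else (cur.reverse ++ s.takeWhile (fun d => !PySem.Chars.isspace d)) ::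
              pvRefWords (s.dropWhile (fun d => !PySem.Chars.isspace d))) := by
  induction s generalizing cur acc with
  | nil =>
    rw [PySem.Chars.split₀.go.eq_def]
    cases cur <;> simp [pvRefWords]
  | cons c rest ih =>
    rw [PySem.Chars.split₀.go.eq_def]
    by_cases hc : PySem.Chars.isspace c = true
    · cases cur with
      | nil => simp [hc, ih, pvRefWords]
      | cons a cur' =>
        simp only [hc, if_true, List.isEmpty_cons, Bool.false_eq_true, if_false]
        rw [ih]
        simp [pvRefWords, hc]
    · cases cur with
      | nil =>
        simp only [List.isEmpty_nil, if_true, if_neg hc]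
        rw [ih]
        simp [pvRefWords, hc]
      | cons a cur' =>
        simp only [if_neg hc]
        rw [ih]
        simp [pvRefWords, hc]

theorem pvSplit₀_eq (s : List Char) : PySem.Chars.split₀ s = pvRefWords s := by
  simp [PySem.Chars.split₀, pvGoSpec]

theorem pvRefWords_words (s : List Char) : pvWords (pvRefWords s) := by
  induction s using pvRefWords.induct with
  | case1 => intro w hw; simp [pvRefWords] at hw
  | case2 c rest hc ih =>
    rw [pvRefWords, if_pos hc]; exact ih
  | case3 c rest hc ih =>
    rw [pvRefWords, if_neg hc]
    intro w hw
    rcases List.mem_cons.mp hw with h | h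
    · subst h
      refine ⟨by simp, ?_⟩
      simp only [pvNoSpace, List.all_eq_true]
      intro c' hc'
      rcases List.mem_cons.mp hc' with rfl | hmem
      · simpa using hc
      · simpa using List.mem_takeWhile_imp hmem
    · exact ih w h

theorem pvRefWords_nil : pvRefWords [] = [] := by rw [pvRefWords]

theorem pvRefWords_spaces (t : List Char) (ht : ∀ c ∈ t, PySem.Chars.isspace c = true) :
    pvRefWords t = [] := by
  induction t with
  | nil => exact pvRefWords_nil
  | cons c t' iht =>
    rw [pvRefWords, if_pos (ht c (by simp))]
    exact iht (fun c h => ht c (by simp [h]))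

theorem pvRefWords_append_spaces (s t : List Char)
    (ht : ∀ c ∈ t, PySem.Chars.isspace c = true) :
    pvRefWords (s ++ t) = pvRefWords s := by
  induction s using pvRefWords.induct with
  | case1 => simpa [pvRefWords_nil] using pvRefWords_spaces t ht
  | case2 c rest hc ih =>
    rw [List.cons_append, pvRefWords, if_pos hc, pvRefWords, if_pos hc]
    exact ih
  | case3 c rest hc ih =>
    rw [List.cons_append, pvRefWords, if_neg hc, pvRefWords, if_neg hc]
    by_cases hall : List.dropWhile (fun d => !PySem.Chars.isspace d) rest = []
    · have htake : List.takeWhile (fun d => !PySem.Chars.isspace d) rest = rest := by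
        have := List.takeWhile_append_dropWhile (p := fun d => !PySem.Chars.isspace d) (l := rest)
        rw [hall] at this; simpa using this
      have htt : List.takeWhile (fun d => !PySem.Chars.isspace d) t = [] := by
        cases t with
        | nil => rfl
        | cons a t' => simp [List.takeWhile_cons, ht a (by simp)]
      rw [List.takeWhile_append, List.dropWhile_append]
      simp only [htake, hall, htt, List.isEmpty_nil, if_pos rfl, List.append_nil, if_true]
      have : List.dropWhile (fun d => !PySem.Chars.isspace d) t = t := by
        cases t with
        | nil => rfl
        | cons a t' => simp [List.dropWhile_cons, ht a (by simp)]
      simp [this, pvRefWords_spaces t ht, pvRefWords_nil]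
    · have hlen : (List.takeWhile (fun d => !PySem.Chars.isspace d) rest).length ≠ rest.length := by
        have hsum := congrArg List.length (List.takeWhile_append_dropWhile (p := fun d => !PySem.Chars.isspace d) (l := rest))
        simp only [List.length_append] at hsum
        have : (List.dropWhile (fun d => !PySem.Chars.isspace d) rest).length ≠ 0 := by
          simpa [List.length_eq_zero_iff] using hall
        omega
      rw [List.takeWhile_append, List.dropWhile_append]
      have hne : (List.dropWhile (fun d => !PySem.Chars.isspace d) rest).isEmpty = false := by
        simpa [List.isEmpty_iff] using hall
      simp only [if_neg hlen, hne, Bool.false_eq_true, if_false]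
      rw [ih]

theorem pvRefWords_lstrip (s : List Char) :
    pvRefWords (PySem.Chars.lstrip s) = pvRefWords s := by
  induction s with
  | nil => rfl
  | cons c rest ih =>
    by_cases hc : PySem.Chars.isspace c = true
    · rw [PySem.Chars.lstrip, List.dropWhile_cons, if_pos hc, pvRefWords, if_pos hc]
      exact ih
    · rw [PySem.Chars.lstrip, List.dropWhile_cons, if_neg hc]

theorem pvSplit₀_strip (s : List Char) :
    PySem.Chars.split₀ (PySem.Chars.strip s) = PySem.Chars.split₀ s := by
  rw [pvSplit₀_eq, pvSplit₀_eq, PySem.Chars.strip]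
  have hdecomp : PySem.Chars.lstrip s =
      PySem.Chars.rstrip (PySem.Chars.lstrip s) ++
        (List.takeWhile PySem.Chars.isspace (PySem.Chars.lstrip s).reverse).reverse := by
    rw [PySem.Chars.rstrip]
    have := List.takeWhile_append_dropWhile (p := PySem.Chars.isspace) (l := (PySem.Chars.lstrip s).reverse)
    have h2 := congrArg List.reverse this
    simp only [List.reverse_append, List.reverse_reverse] at h2
    exact h2.symm
  have hsp : ∀ c ∈ (List.takeWhile PySem.Chars.isspace (PySem.Chars.lstrip s).reverse).reverse,
      PySem.Chars.isspace c = true := by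
    intro c hcm
    exact List.mem_takeWhile_imp (List.mem_reverse.mp hcm)
  calc pvRefWords (PySem.Chars.rstrip (PySem.Chars.lstrip s))
      = pvRefWords (PySem.Chars.rstrip (PySem.Chars.lstrip s) ++
          (List.takeWhile PySem.Chars.isspace (PySem.Chars.lstrip s).reverse).reverse) := by
        rw [pvRefWords_append_spaces _ _ hsp]
    _ = pvRefWords (PySem.Chars.lstrip s) := by rw [← hdecomp]
    _ = pvRefWords s := pvRefWords_lstrip s

theorem pvLowerChar_nospace (c : Char) (h : PySem.Chars.isspace c = false) :
    PySem.Chars.isspace (PySem.Chars.lowerChar c) = false := by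
  unfold PySem.Chars.lowerChar
  by_cases hu : PySem.Chars.isupper c = true
  · simp only [hu, if_true]
    have hn : 65 ≤ c.toNat ∧ c.toNat ≤ 90 := by
      simp [PySem.Chars.isupper, Char.le_def] at hu
      exact ⟨hu.1, hu.2⟩
    have hv : (c.toNat + 32).isValidChar := by left; omega
    have ht : (Char.ofNat (c.toNat + 32)).toNat = c.toNat + 32 := by
      rw [Char.toNat_ofNat, if_pos hv]
    simp only [PySem.Chars.isspace, ht]
    simp only [Bool.or_eq_false_iff, Bool.and_eq_false_iff]
    refine ⟨⟨⟨⟨⟨⟨⟨⟨⟨⟨⟨?_, ?_⟩, ?_⟩, ?_⟩, ?_⟩, ?_⟩, ?_⟩, ?_⟩, ?_⟩, ?_⟩, ?_⟩, ?_⟩ <;>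
      simp <;> omega
  · simp [hu, h]

theorem pvLower_join (ws : List (List Char)) :
    PySem.Chars.lower (PySem.Chars.join [' '] ws) = PySem.Chars.join [' '] (ws.map PySem.Chars.lower) := by
  match ws with
  | [] => rfl
  | [w] => simp [PySem.Chars.join_singleton]
  | w :: q :: rest =>
    rw [PySem.Chars.join_cons_cons, List.map_cons, List.map_cons, PySem.Chars.join_cons_cons]
    rw [show PySem.Chars.lower q :: List.map PySem.Chars.lower rest = List.map PySem.Chars.lower (q :: rest) from rfl]
    rw [← pvLower_join (q :: rest)]
    simp [PySem.Chars.lower]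
    rfl

theorem pvLower_nospace (w : List Char) (h : pvNoSpace w = true) :
    pvNoSpace (PySem.Chars.lower w) = true := by
  simp only [pvNoSpace, PySem.Chars.lower, List.all_map, List.all_eq_true] at h ⊢
  intro c hcm
  have := h c hcm
  simp only [Function.comp, Bool.not_eq_true'] at this ⊢
  exact pvLowerChar_nospace c this

theorem pvPrefix_notword (v w : List Char) (hw : pvNoSpace w = true) :
    ¬ (v ++ [' '] <+: w) := by
  intro h
  have hmem : ' ' ∈ w := h.subset (by simp)
  simp only [pvNoSpace, List.all_eq_true] at hw
  have := hw ' ' hmem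
  simp [PySem.Chars.isspace] at this

theorem pvPrefix_iff (v w : List Char) (J : List Char)
    (hv : pvNoSpace v = true) (hw : pvNoSpace w = true) :
    (v ++ [' '] <+: w ++ [' '] ++ J) ↔ v = w := by
  induction v generalizing w with
  | nil =>
    cases w with
    | nil => simp
    | cons c w' =>
      simp only [List.nil_append, List.cons_append, List.cons_prefix_cons]
      constructor
      · rintro ⟨h1, -⟩
        exfalso
        simp only [pvNoSpace, List.all_eq_true] at hw
        have := hw c (by simp)
        rw [← h1] at this
        simp [PySem.Chars.isspace] at this
      · intro h; cases h
  | cons a v' ih =>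
    cases w with
    | nil =>
      simp only [List.cons_append, List.nil_append, List.cons_prefix_cons]
      constructor
      · rintro ⟨h1, -⟩
        exfalso
        simp only [pvNoSpace, List.all_eq_true] at hv
        have := hv a (by simp)
        rw [h1] at this
        simp [PySem.Chars.isspace] at this
      · intro h; cases h
    | cons c w' =>
      simp only [List.cons_append, List.cons_prefix_cons]
      have hv' : pvNoSpace v' = true := by
        simp only [pvNoSpace, List.all_cons, Bool.and_eq_true] at hv
        exact hv.2
      have hw' : pvNoSpace w' = true := by
        simp only [pvNoSpace, List.all_cons, Bool.and_eq_true] at hw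
        exact hw.2
      rw [ih w' hv' hw']
      constructor
      · rintro ⟨h1, h2⟩; rw [h1, h2]
      · intro h; injection h with h1 h2; exact ⟨h1, h2⟩

theorem pvJoin_ends_nospace (w : List Char) (rest : List (List Char))
    (hW : pvWords (w :: rest)) :
    ∃ t c, PySem.Chars.join [' '] (w :: rest) = t ++ [c] ∧ PySem.Chars.isspace c = false := by
  induction rest generalizing w with
  | nil =>
    obtain ⟨hne, hsp⟩ := hW w (by simp)
    obtain ⟨t, c, htc⟩ : ∃ t c, w = t ++ [c] := by
      induction w using List.reverseRecOn with
      | nil => exact absurd rfl hne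
      | append_singleton t c _ => exact ⟨t, c, rfl⟩
    refine ⟨t, c, by simp [PySem.Chars.join_singleton, htc], ?_⟩
    simp only [pvNoSpace, List.all_eq_true] at hsp
    have := hsp c (by simp [htc])
    simpa using this
  | cons q rest' ih =>
    obtain ⟨t, c, htc, hc⟩ := ih q (fun x hx => hW x (by simp at hx ⊢; tauto))
    exact ⟨w ++ [' '] ++ t, c, by rw [PySem.Chars.join_cons_cons, htc]; simp, hc⟩

theorem pvStrip_join (w : List Char) (rest : List (List Char)) (hW : pvWords (w :: rest)) :
    PySem.Chars.strip (PySem.Chars.join [' '] (w :: rest)) = PySem.Chars.join [' '] (w :: rest) := by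
  obtain ⟨hne, hsp⟩ := hW w (by simp)
  -- head of the join is the head of w, a non-space
  obtain ⟨c0, w', hw0⟩ : ∃ c0 w', w = c0 :: w' := by
    cases w with
    | nil => exact absurd rfl hne
    | cons a b => exact ⟨a, b, rfl⟩
  have hc0 : PySem.Chars.isspace c0 = false := by
    simp only [pvNoSpace, List.all_eq_true] at hsp
    simpa using hsp c0 (by simp [hw0])
  obtain ⟨J, hJ⟩ : ∃ J, PySem.Chars.join [' '] (w :: rest) = c0 :: J := by
    cases rest with
    | nil => exact ⟨w', by simp [PySem.Chars.join_singleton, hw0]⟩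
    | cons q rest' =>
      exact ⟨w' ++ [' '] ++ PySem.Chars.join [' '] (q :: rest'), by
        rw [PySem.Chars.join_cons_cons, hw0]; simp⟩
  obtain ⟨t, c, htc, hc⟩ := pvJoin_ends_nospace w rest hW
  rw [PySem.Chars.strip, PySem.Chars.lstrip, hJ, List.dropWhile_cons, if_neg (by simp [hc0]), ← hJ]
  rw [PySem.Chars.rstrip, htc]
  simp only [List.reverse_append, List.reverse_cons, List.reverse_nil, List.nil_append,
    List.cons_append, List.dropWhile_cons, if_neg (by simp [hc] : ¬ (PySem.Chars.isspace c = true))]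
  simp

theorem pvSplit₀_strip_str (prompt : String) :
    PySem.Str.split₀ (PySem.Str.strip prompt) = PySem.Str.split₀ prompt := by
  apply List.map_injective_iff.mpr (fun a b h => String.toList_inj.mp h)
  rw [PySem.Str.split₀_map_toList, PySem.Str.split₀_map_toList, PySem.Str.toList_strip,
    pvSplit₀_strip]

theorem pvWords_split₀ (prompt : String) :
    pvWords (List.map String.toList (PySem.Str.split₀ prompt)) := by
  rw [PySem.Str.split₀_map_toList, pvSplit₀_eq]
  exact pvRefWords_words _

theorem pvJoin_toList (ws : List String) :
    (PySem.Str.join " " ws).toList = PySem.Chars.join [' '] (List.map String.toList ws) := by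
  rw [PySem.Str.toList_join]
  rfl

theorem pvLower_join_str (ws : List String) :
    PySem.Str.lower (PySem.Str.join " " ws) = PySem.Str.join " " (List.map PySem.Str.lower ws) := by
  apply String.toList_inj.mp
  rw [PySem.Str.toList_lower, pvJoin_toList, pvJoin_toList, pvLower_join, List.map_map, List.map_map]
  congr 1
  apply List.map_congr_left
  intro x hx
  exact (PySem.Str.toList_lower x).symm

theorem pvJoin_cons_cons_toList (w r : String) (t : List String) :
    (PySem.Str.join " " (w :: r :: t)).toList =
      w.toList ++ [' '] ++ PySem.Chars.join [' '] (List.map String.toList (r :: t)) := by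
  rw [pvJoin_toList]
  simp only [List.map_cons]
  rw [PySem.Chars.join_cons_cons, ← List.map_cons]

theorem pvScan_none (action normalized lowered : String) (ps : List String)
    (h : ∀ p ∈ ps, PySem.Str.startswith lowered p = false) :
    pvScanPrefixes action normalized lowered ps = none := by
  induction ps with
  | nil => rfl
  | cons p ps' ih =>
    have hp := h p (by simp)
    rw [PySem.Str.startswith] at hp
    rw [pvScanPrefixes, PySem.Str.startswith, hp, if_neg (by simp)]
    exact ih (fun q hq => h q (by simp [hq]))

theorem pvStartswith_single (w v p : String)
    (hp : p.toList = v.toList ++ [' '])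
    (hw : pvNoSpace w.toList = true) :
    PySem.Str.startswith (PySem.Str.join " " [w]) p = false := by
  have h1 : (PySem.Str.join " " [w]).toList = w.toList := by
    rw [pvJoin_toList, List.map_cons, List.map_nil, PySem.Chars.join_singleton]
  rw [PySem.Str.startswith]
  rw [Bool.eq_false_iff]
  intro hcon
  have := (PySem.Chars.startswith_iff _ _).mp hcon
  rw [h1, hp] at this
  exact pvPrefix_notword _ _ hw this

theorem pvStartswith_verb (w r : String) (t : List String) (v p : String)
    (hp : p.toList = v.toList ++ [' '])
    (hv : pvNoSpace v.toList = true)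
    (hw : pvNoSpace w.toList = true) :
    PySem.Str.startswith (PySem.Str.join " " (PySem.Str.lower w :: PySem.Str.lower r :: List.map PySem.Str.lower t)) p
      = (PySem.Str.lower w == v) := by
  have hlw : pvNoSpace (PySem.Str.lower w).toList = true := by
    rw [PySem.Str.toList_lower]; exact pvLower_nospace _ hw
  rw [PySem.Str.startswith]
  have h1 := pvJoin_cons_cons_toList (PySem.Str.lower w) (PySem.Str.lower r) (List.map PySem.Str.lower t)
  by_cases hvw : PySem.Str.lower w = v
  · have : (PySem.Str.lower w == v) = true := by simp [hvw]
    rw [this]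
    apply (PySem.Chars.startswith_iff _ _).mpr
    rw [h1, hp, hvw]
    exact ((pvPrefix_iff v.toList v.toList _ hv (by rw [← hvw]; exact hlw)).mpr rfl)
  · have : (PySem.Str.lower w == v) = false := by simp [hvw]
    rw [this, Bool.eq_false_iff]
    intro hcon
    have h2 := (PySem.Chars.startswith_iff _ _).mp hcon
    rw [h1, hp] at h2
    have := (pvPrefix_iff v.toList (PySem.Str.lower w).toList _ hv hlw).mp h2
    exact hvw (String.toList_inj.mp this.symm)

theorem pvArg (w r : String) (t : List String) (p : String)
    (hplen : PySem.Str.len p = (w.toList.length : Int) + 1)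
    (hW : pvWords (List.map String.toList (r :: t))) :
    PySem.Str.strip (PySem.Str.slice (PySem.Str.join " " (w :: r :: t)) (some (PySem.Str.len p)) none)
      = PySem.Str.join " " (r :: t) := by
  apply String.toList_inj.mp
  rw [PySem.Str.toList_strip]
  have hslice : (PySem.Str.slice (PySem.Str.join " " (w :: r :: t)) (some (PySem.Str.len p)) none).toList
      = PySem.Chars.join [' '] (List.map String.toList (r :: t)) := by
    rw [PySem.Str.slice, String.toList_ofList, PySem.Chars.slice_eq_listSlice, hplen]
    rw [show ((w.toList.length : Int) + 1) = ((w.toList.length + 1 : Nat) : Int) by push_cast; ring]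
    rw [PySem.List.slice_from_natCast, pvJoin_cons_cons_toList]
    rw [List.append_assoc]
    rw [show w.toList.length + 1 = (w.toList ++ [' ']).length by simp]
    rw [← List.append_assoc, List.drop_left]
  rw [hslice]
  have : PySem.Chars.join [' '] (List.map String.toList (r :: t))
      = PySem.Chars.join [' '] (r.toList :: List.map String.toList t) := by
    simp
  rw [this]
  rw [pvStrip_join r.toList (List.map String.toList t) (by simpa using hW)]
  rw [pvJoin_toList]
  simp


set_option maxHeartbeats 1000000 in
theorem pvMain (prompt : String) :
    (let normalized := PySem.Str.join " " (PySem.Str.split₀ (PySem.Str.strip prompt))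
     if normalized = "" then none
     else
       let lowered := PySem.Str.lower normalized
       if lowered ∈ ["canais", "canal", "channels", "channel", "list channels", "listar canais"] then
         some ("list", "")
       else
         match pvScanPrefixes "join" normalized lowered ["join ", "entrar ", "add "] with
         | some r => some r
         | none =>
           match pvScanPrefixes "part" normalized lowered ["part ", "leave ", "sair ", "remove "] with
           | some r => some r
           | none => none : Option (String × String)) =
    (match PySem.Str.split₀ prompt with
     | [] => none
     | w :: rest =>
       let lowered := (w :: rest).map PySem.Str.lower
       if PySem.Str.join " " lowered ∈ ["canais", "canal", "channels", "channel", "list channels", "listar canais"] then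
         some ("list", "")
       else if (w :: rest).length < 2 then none
       else
         let verb := lowered.headD ""
         if verb ∈ ["join", "entrar", "add"] then
           some ("join", PySem.Str.join " " rest)
         else if verb ∈ ["part", "leave", "sair", "remove"] then
           some ("part", PySem.Str.join " " rest)
         else none) := by
  simp only []
  rw [pvSplit₀_strip_str]
  have hW := pvWords_split₀ prompt
  cases hcase : PySem.Str.split₀ prompt with
  | nil =>
    rw [show PySem.Str.join " " ([] : List String) = "" from rfl]
    simp
  | cons w rest =>
    rw [hcase] at hW
    have hwword := hW w.toList (by simp)
    dsimp only [List.map_cons, List.headD_cons, List.length_cons]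
    have hne : ¬ (PySem.Str.join " " (w :: rest) = "") := by
      intro hcon
      have := congrArg String.toList hcon
      cases rest with
      | nil =>
        rw [pvJoin_toList] at this
        simp only [List.map_cons, List.map_nil, PySem.Chars.join_singleton] at this
        exact hwword.1 (by simpa using this)
      | cons r t =>
        rw [pvJoin_cons_cons_toList] at this
        cases hw : w.toList with
        | nil => exact hwword.1 hw
        | cons a b => rw [hw] at this; simp at this
    rw [if_neg hne, pvLower_join_str]
    simp only [List.map_cons]
    by_cases hmem : PySem.Str.join " " (PySem.Str.lower w :: List.map PySem.Str.lower rest) ∈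
        ["canais", "canal", "channels", "channel", "list channels", "listar canais"]
    · rw [if_pos hmem, if_pos hmem]
    · rw [if_neg hmem, if_neg hmem]
      cases rest with
      | nil =>
        simp only [List.map_nil]
        rw [if_pos (by simp : (([] : List String)).length + 1 < 2)]
        have hlw : pvNoSpace (PySem.Str.lower w).toList = true := by
          rw [PySem.Str.toList_lower]; exact pvLower_nospace _ hwword.2
        have hscan : ∀ action (ps : List String),
            (∀ p ∈ ps, ∃ v : String, p.toList = v.toList ++ [' ']) →
            pvScanPrefixes action (PySem.Str.join " " [w])
              (PySem.Str.join " " [PySem.Str.lower w]) ps = none := by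
          intro action ps hps
          apply pvScan_none
          intro p hp
          obtain ⟨v, hv⟩ := hps p hp
          exact pvStartswith_single (PySem.Str.lower w) v p hv hlw
        rw [hscan "join" _ (by
          intro p hp
          fin_cases hp
          · exact ⟨"join", rfl⟩
          · exact ⟨"entrar", rfl⟩
          · exact ⟨"add", rfl⟩)]
        rw [hscan "part" _ (by
          intro p hp
          fin_cases hp
          · exact ⟨"part", rfl⟩
          · exact ⟨"leave", rfl⟩
          · exact ⟨"sair", rfl⟩
          · exact ⟨"remove", rfl⟩)]
      | cons r t =>
        rw [if_neg (by simp : ¬ (((r :: t) : List String).length + 1 < 2))]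
        simp only [List.map_cons]
        have hws := hwword.2
        have hstart : ∀ (v p : String), p.toList = v.toList ++ [' '] →
            pvNoSpace v.toList = true →
            PySem.Str.startswith
              (PySem.Str.join " " (PySem.Str.lower w :: PySem.Str.lower r :: List.map PySem.Str.lower t)) p
              = (PySem.Str.lower w == v) := by
          intro v p hp hv
          exact pvStartswith_verb w r t v p hp hv hws
        have harg : ∀ (p : String) (v : String), PySem.Str.lower w = v →
            PySem.Str.len p = (v.toList.length : Int) + 1 →
            PySem.Str.strip (PySem.Str.slice (PySem.Str.join " " (w :: r :: t)) (some (PySem.Str.len p)) none)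
              = PySem.Str.join " " (r :: t) := by
          intro p v hvw hpl
          apply pvArg w r t p _ (fun x hx => hW x (by simp at hx ⊢; tauto))
          rw [hpl]
          have : w.toList.length = v.toList.length := by
            rw [← hvw, PySem.Str.toList_lower, PySem.Chars.lower, List.length_map]
          rw [this]
        rw [pvScanPrefixes, pvScanPrefixes, pvScanPrefixes, pvScanPrefixes,
          pvScanPrefixes, pvScanPrefixes, pvScanPrefixes, pvScanPrefixes, pvScanPrefixes]
        rw [hstart "join" "join " rfl (by decide), hstart "entrar" "entrar " rfl (by decide),
          hstart "add" "add " rfl (by decide), hstart "part" "part " rfl (by decide),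
          hstart "leave" "leave " rfl (by decide), hstart "sair" "sair " rfl (by decide),
          hstart "remove" "remove " rfl (by decide)]
        by_cases h1 : PySem.Str.lower w = "join"
        · rw [harg "join " "join" h1 (by decide)]
          simp [h1]
        by_cases h2 : PySem.Str.lower w = "entrar"
        · rw [harg "entrar " "entrar" h2 (by decide)]
          simp [h1, h2]
        by_cases h3 : PySem.Str.lower w = "add"
        · rw [harg "add " "add" h3 (by decide)]
          simp [h1, h2, h3]
        by_cases h4 : PySem.Str.lower w = "part"
        · rw [harg "part " "part" h4 (by decide)]
          simp [h1, h2, h3, h4]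
        by_cases h5 : PySem.Str.lower w = "leave"
        · rw [harg "leave " "leave" h5 (by decide)]
          simp [h1, h2, h3, h4, h5]
        by_cases h6 : PySem.Str.lower w = "sair"
        · rw [harg "sair " "sair" h6 (by decide)]
          simp [h1, h2, h3, h4, h5, h6]
        by_cases h7 : PySem.Str.lower w = "remove"
        · rw [harg "remove " "remove" h7 (by decide)]
          simp [h1, h2, h3, h4, h5, h6, h7]
        simp [h1, h2, h3, h4, h5, h6, h7]

-- ===== VERDICT (by name: the statement is the Claim_ definition above) =====
theorem parse_channel_management_prompt_py_spec : Claim_equal_parse_channel_management_prompt_py := by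
  intro prompt _
  unfold Spec_parse_channel_management_prompt_py parse_channel_management_prompt_py parse_channel_management_prompt_py_alt
  exact pvMain prompt
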